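-- pv_equiv track=rewrite | github.com/The-Outsider-97/SLAI | src/agents/language_agent.py | _detect_modality
-- ===== SOURCE A (Python) =====
-- def _detect_modality(tokens: list) -> str:
--     """Modality classification using lexical markers"""
--     markers = {
--         'interrogative': {"what", "why", "how", "?"},
--         'imperative': {"please", "must", "should"},
--         'conditional': {"if", "unless", "provided"}
--     }
--
--     for mod_type, mod_markers in markers.items():
--         if any(m in tokens for m in mod_markers):
--             return mod_type
--     return "declarative"
-- ===== SOURCE B (Python) =====
-- def _detect_modality(tokens: list) -> str:
--     """Modality classification using lexical markers (one-pass reverse index)."""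
--     index = {
--         "what": "interrogative", "why": "interrogative",
--         "how": "interrogative", "?": "interrogative",
--         "please": "imperative", "must": "imperative", "should": "imperative",
--         "if": "conditional", "unless": "conditional", "provided": "conditional",
--     }
--     present = set()
--     for t in tokens:
--         cat = index.get(t)
--         if cat is not None:
--             present.add(cat)
--     for cat in ("interrogative", "imperative", "conditional"):
--         if cat in present:
--             return cat
--     return "declarative"
-- ===== Notes on version B (the rewrite author's own statement) =====
-- stated objective: alternative
-- what changed: Replaces A's three per-category scans of the token list with a flat marker-to-category reverse index, a single pass over the tokens collecting the categories present, and a lookup along the fixed priority list; measured ~1.3x on large inputs, below the 1.5x bar, so no speed is claimed.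
import Mathlib
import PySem

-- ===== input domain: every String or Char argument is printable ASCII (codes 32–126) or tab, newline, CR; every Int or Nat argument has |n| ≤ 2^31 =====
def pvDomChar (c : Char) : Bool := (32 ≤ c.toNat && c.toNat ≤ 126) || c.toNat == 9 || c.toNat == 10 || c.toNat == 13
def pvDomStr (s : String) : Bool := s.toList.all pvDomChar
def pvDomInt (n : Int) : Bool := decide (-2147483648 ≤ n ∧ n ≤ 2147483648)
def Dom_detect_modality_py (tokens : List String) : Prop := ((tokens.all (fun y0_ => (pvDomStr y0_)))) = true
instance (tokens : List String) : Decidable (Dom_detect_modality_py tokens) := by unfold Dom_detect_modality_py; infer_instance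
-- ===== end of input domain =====

-- ===== PORT A =====
-- B replaces A's three per-category scans with one reverse-index pass over the tokens
-- plus a priority lookup (objective: alternative decomposition; equal return values).
def detect_modality_py (tokens : List String) : String :=
  if ["what", "why", "how", "?"].any (fun m => tokens.contains m) then "interrogative"
  else if ["please", "must", "should"].any (fun m => tokens.contains m) then "imperative"
  else if ["if", "unless", "provided"].any (fun m => tokens.contains m) then "conditional"
  else "declarative"

-- ===== PORT B =====
def pvIndex : PySem.Dict String String :=
  PySem.Dict.mk
  [("what", "interrogative"), ("why", "interrogative"),
   ("how", "interrogative"), ("?", "interrogative"),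
   ("please", "imperative"), ("must", "imperative"), ("should", "imperative"),
   ("if", "conditional"), ("unless", "conditional"), ("provided", "conditional")]

def detect_modality_py_alt (tokens : List String) : String :=
  let present : PySem.Set String :=
    tokens.foldl (fun s t =>
      match PySem.Dict.get? pvIndex t with
      | some cat => PySem.Set.add s cat
      | none => s) PySem.Set.empty
  match ["interrogative", "imperative", "conditional"].find?
      (fun cat => PySem.Set.contains present cat) with
  | some cat => cat
  | none => "declarative"

-- ===== PRECONDITION & SPEC =====
def Spec_detect_modality_py (tokens : List String) (out : String) : Prop := out = detect_modality_py_alt tokens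
instance (tokens : List String) (out : String) : Decidable (Spec_detect_modality_py tokens out) := by unfold Spec_detect_modality_py; infer_instance

-- ===== CLAIM (what is proved, stated in full; the proofs are below) =====
def Claim_equal_detect_modality_py : Prop := ∀ (tokens : List String), Dom_detect_modality_py tokens → Spec_detect_modality_py tokens (detect_modality_py tokens)

-- ===== LEMMAS AND PROOFS =====

-- membership in the folded 'present' set, with a generalized accumulator
theorem mem_fold_present (tokens : List String) (s : PySem.Set String) (c : String) :
    (c ∈ tokens.foldl (fun s t =>
        match PySem.Dict.get? pvIndex t with
        | some cat => PySem.Set.add s cat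
        | none => s) s)
    ↔ (c ∈ s ∨ (tokens.any (fun t => PySem.Dict.get? pvIndex t == some c)) = true) := by
  induction tokens generalizing s with
  | nil => simp
  | cons t ts ih =>
    simp only [List.foldl_cons, List.any_cons]
    cases h : PySem.Dict.get? pvIndex t with
    | none => simp [ih]
    | some cat =>
      simp only [ih, PySem.Set.mem_add, Bool.or_eq_true, beq_iff_eq,
        Option.some.injEq]
      by_cases hc : cat = c <;> subst_eqs <;> tauto

-- get? on a literal dict, unrolled one key at a time
theorem get_chain (k v : String) (rest : List (String × String)) (t c : String) :
    ((PySem.Dict.mk ((k, v) :: rest)).get? t == some c)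
      = (if k == t then (v == c) else ((PySem.Dict.mk rest).get? t == some c)) := by
  rw [PySem.Dict.get?_mk_cons]
  split_ifs <;> simp

theorem get_nil (t c : String) :
    ((PySem.Dict.mk ([] : List (String × String))).get? t == some c) = false := by
  simp [PySem.Dict.get?]

-- pointwise: the reverse index maps t to a category iff t is one of its markers
theorem index_interrogative (t : String) :
    (PySem.Dict.get? pvIndex t == some "interrogative")
      = ["what", "why", "how", "?"].contains t := by
  simp only [pvIndex, get_chain, get_nil, List.contains_cons, List.contains_nil]
  split_ifs <;> simp_all [beq_iff_eq] <;>
    first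
    | (subst_vars; simp)
    | (repeat' apply And.intro) <;> (intro h; subst h; simp_all)

theorem index_imperative (t : String) :
    (PySem.Dict.get? pvIndex t == some "imperative")
      = ["please", "must", "should"].contains t := by
  simp only [pvIndex, get_chain, get_nil, List.contains_cons, List.contains_nil]
  split_ifs <;> simp_all [beq_iff_eq] <;>
    first
    | (subst_vars; simp)
    | (repeat' apply And.intro) <;> (intro h; subst h; simp_all)

theorem index_conditional (t : String) :
    (PySem.Dict.get? pvIndex t == some "conditional")
      = ["if", "unless", "provided"].contains t := by
  simp only [pvIndex, get_chain, get_nil, List.contains_cons, List.contains_nil]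
  split_ifs <;> simp_all [beq_iff_eq] <;>
    first
    | (subst_vars; simp)
    | (repeat' apply And.intro) <;> (intro h; subst h; simp_all)

-- Set.contains of the folded 'present' set, Bool form
theorem contains_fold_present (tokens : List String) (c : String) :
    PySem.Set.contains
      (tokens.foldl (fun s t =>
        match PySem.Dict.get? pvIndex t with
        | some cat => PySem.Set.add s cat
        | none => s) PySem.Set.empty) c
    = tokens.any (fun t => PySem.Dict.get? pvIndex t == some c) := by
  rw [Bool.eq_iff_iff]
  simp [PySem.Set.contains, mem_fold_present, PySem.Set.empty, List.any_eq_true]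

-- marker-side scan equals token-side scan, for each category
theorem scan_swap (tokens : List String) (ms : List String) :
    ms.any (fun m => tokens.contains m) = tokens.any (fun t => ms.contains t) := by
  rw [Bool.eq_iff_iff]
  simp only [List.any_eq_true, List.contains_iff_mem]
  constructor
  · rintro ⟨m, hm, ht⟩; exact ⟨m, ht, hm⟩
  · rintro ⟨t, ht, hm⟩; exact ⟨t, hm, ht⟩

-- ===== VERDICT (by name: the statement is the Claim_ definition above) =====
theorem detect_modality_py_spec : Claim_equal_detect_modality_py := by
  intro tokens _
  show detect_modality_py tokens = detect_modality_py_alt tokens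
  simp only [detect_modality_py_alt, contains_fold_present, index_interrogative,
    index_imperative, index_conditional, List.find?]
  simp only [detect_modality_py, scan_swap]
  simp only [List.any_cons, List.any_nil, List.contains_eq_mem, Bool.or_false,
    ← Bool.decide_or]
  by_cases h1 : "what" ∈ tokens ∨ "why" ∈ tokens ∨ "how" ∈ tokens ∨ "?" ∈ tokens <;>
  by_cases h2 : "please" ∈ tokens ∨ "must" ∈ tokens ∨ "should" ∈ tokens <;>
  by_cases h3 : "if" ∈ tokens ∨ "unless" ∈ tokens ∨ "provided" ∈ tokens <;>
  simp only [h1, h2, h3, decide_true, decide_false, if_true] <;> simp
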